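-- pv_equiv track=rewrite | github.com/d-shames3/advent-of-code-24 | advent_of_code/day5/day5pt2.py | populate_rule_dict
-- ===== SOURCE A (Python) =====
-- def populate_rule_dict(keys: list, rules: list) -> dict:
--     rule_dict = {k: [] for k in keys}
--     for k, v in rule_dict.items():
--         for i in rules:
--             if k == i[0]:
--                 v.append(i[1])
--         v.sort()
--     final_rule_dict = {k: v for k, v in rule_dict.items() if len(v) > 0}
--     return final_rule_dict
-- ===== SOURCE B (Python) =====
-- def populate_rule_dict(keys: list, rules: list) -> dict:
--     groups = {}
--     for a, b in rules:
--         groups.setdefault(a, []).append(b)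
--     out = {}
--     for k in dict.fromkeys(keys):
--         if k in groups:
--             out[k] = sorted(groups[k])
--     return out
-- ===== Notes on version B (the rewrite author's own statement) =====
-- stated objective: faster
-- what changed: Instead of scanning the whole rule list once per key (nested loops), B groups the rules by first element in a single pass into a dict, then emits sorted groups for the deduplicated keys in order.
import Mathlib
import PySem

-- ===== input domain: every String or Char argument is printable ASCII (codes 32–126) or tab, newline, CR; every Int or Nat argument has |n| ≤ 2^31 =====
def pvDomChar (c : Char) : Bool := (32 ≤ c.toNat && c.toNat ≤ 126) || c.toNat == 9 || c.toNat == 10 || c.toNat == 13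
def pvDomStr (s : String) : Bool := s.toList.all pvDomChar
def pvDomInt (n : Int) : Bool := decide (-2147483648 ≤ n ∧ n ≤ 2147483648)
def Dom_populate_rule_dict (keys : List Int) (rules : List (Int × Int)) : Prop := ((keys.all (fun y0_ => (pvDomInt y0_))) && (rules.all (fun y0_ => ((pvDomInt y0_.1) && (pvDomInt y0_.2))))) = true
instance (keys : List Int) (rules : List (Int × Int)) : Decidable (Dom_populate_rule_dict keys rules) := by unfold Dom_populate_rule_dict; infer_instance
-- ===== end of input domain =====

-- B replaces A's per-key scan of the whole rule list by a single-pass grouping dict (faster).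
-- ===== PORT A =====
def populate_rule_dict (keys : List Int) (rules : List (Int × Int)) : List (Int × List Int) :=
  -- rule_dict = {k: [] for k in keys}
  let rule_dict : PySem.Dict Int (List Int) :=
    keys.foldl (fun d k => d.insert k []) PySem.Dict.empty
  -- for k, v in rule_dict.items(): for i in rules: if k == i[0]: v.append(i[1]); v.sort()
  let rule_dict2 : PySem.Dict Int (List Int) :=
    PySem.Dict.mk (rule_dict.items.map (fun kv =>
      (kv.1, PySem.List.sorted
        (rules.foldl (fun v i => if kv.1 == i.1 then v ++ [i.2] else v) kv.2)
        (fun x => x) false)))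
  -- final_rule_dict = {k: v for k, v in rule_dict.items() if len(v) > 0}
  rule_dict2.items.filter (fun kv => kv.2.length > 0)

-- ===== PORT B =====
def populate_rule_dict_alt (keys : List Int) (rules : List (Int × Int)) : List (Int × List Int) :=
  -- groups = {}; for a, b in rules: groups.setdefault(a, []).append(b)
  let groups : PySem.Dict Int (List Int) :=
    rules.foldl (fun g p => g.modify p.1 [] (fun x => x ++ [p.2])) PySem.Dict.empty
  -- out = {}; for k in dict.fromkeys(keys): if k in groups: out[k] = sorted(groups[k])
  let out : PySem.Dict Int (List Int) :=
    (PySem.List.dedup keys).foldl (fun o k =>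
      if groups.contains k then
        o.insert k (PySem.List.sorted (groups.getD k []) (fun x => x) false)
      else o) PySem.Dict.empty
  out.items

-- ===== PRECONDITION & SPEC =====
def Spec_populate_rule_dict (keys : List Int) (rules : List (Int × Int)) (out : List (Int × List Int)) : Prop := out = populate_rule_dict_alt keys rules
instance (keys : List Int) (rules : List (Int × Int)) (out : List (Int × List Int)) : Decidable (Spec_populate_rule_dict keys rules out) := by unfold Spec_populate_rule_dict; infer_instance

-- ===== CLAIM (what is proved, stated in full; the proofs are below) =====
def Claim_equal_populate_rule_dict : Prop := ∀ (keys : List Int) (rules : List (Int × Int)), Dom_populate_rule_dict keys rules → Spec_populate_rule_dict keys rules (populate_rule_dict keys rules)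

-- ===== LEMMAS AND PROOFS =====
theorem pv_getD_foldl_insert_nil (keys : List Int) (d : PySem.Dict Int (List Int))
    (h : ∀ j, d.getD j [] = []) (j : Int) :
    (keys.foldl (fun d k => d.insert k ([] : List Int)) d).getD j [] = [] := by
  induction keys generalizing d with
  | nil => simpa using h j
  | cons k ks ih =>
      simp only [List.foldl_cons]
      refine ih _ (fun j' => ?_)
      rw [PySem.Dict.getD_insert]
      split <;> simp [h j']

theorem pv_itemsA (keys : List Int) :
    (keys.foldl (fun d k => d.insert k ([] : List Int)) PySem.Dict.empty).items
      = (PySem.Set.ofList keys).map (fun k => (k, ([] : List Int))) := by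
  rw [PySem.Dict.items_eq_map_keys _
        (PySem.Dict.nodup_keys_foldl_insert keys (fun _ _ => ([] : List Int)) _
          PySem.Dict.nodup_keys_empty) ([] : List Int)]
  rw [PySem.Dict.keys_foldl_insert (f := fun _ _ => ([] : List Int))]
  rw [PySem.Dict.keys_empty, PySem.Set.update_nil_left]
  refine List.map_congr_left (fun k _ => ?_)
  rw [pv_getD_foldl_insert_nil _ _ (fun j => PySem.Dict.getD_empty j [])]

theorem pv_B_items (G : PySem.Dict Int (List Int)) (ks : List Int) (hnd : ks.Nodup) :
    (List.foldl (fun o k =>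
        if G.contains k = true then
          o.insert k (PySem.List.sorted (G.getD k []) (fun x => x) false)
        else o) PySem.Dict.empty ks).items
      = (ks.filter (fun k => G.contains k)).map
          (fun k => (k, PySem.List.sorted (G.getD k []) (fun x => x) false)) := by
  rw [PySem.List.foldl_if_eq_foldl_filter (δ := PySem.Dict Int (List Int))
        (p := fun k => G.contains k)
        (f := fun o k => PySem.Dict.insert o k (PySem.List.sorted (G.getD k []) (fun x => x) false))]
  rw [PySem.Dict.items_foldl_insert_fresh _ (fun k => k)
        (fun k => PySem.List.sorted (G.getD k []) (fun x => x) false) _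
        (fun a _ => PySem.Dict.contains_empty a)
        (by simpa using hnd.filter _)]
  simp [PySem.Dict.empty]

-- ===== VERDICT (by name: the statement is the Claim_ definition above) =====
theorem populate_rule_dict_spec : Claim_equal_populate_rule_dict := by
  intro keys rules _
  show populate_rule_dict keys rules = populate_rule_dict_alt keys rules
  have hfeq : ∀ k : Int,
      List.filter (fun p => p.1 == k) rules = List.filter (fun i => k == i.1) rules :=
    fun k => List.filter_congr (fun p _ => by simp [eq_comm])
  have hgroupsD : ∀ k : Int,
      (List.foldl (fun g p => g.modify p.1 [] (fun x => x ++ [p.2])) PySem.Dict.empty rules).getD k []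
        = List.map (fun i => i.2) (List.filter (fun i => k == i.1) rules) := by
    intro k
    rw [PySem.Dict.getD_foldl_modify_append, PySem.Dict.getD_empty, List.nil_append, hfeq]
  have hcont : ∀ k : Int,
      (List.foldl (fun g p => g.modify p.1 [] (fun x => x ++ [p.2])) PySem.Dict.empty rules).contains k
        = decide (0 < (PySem.List.sorted
            (List.map (fun i => i.2) (List.filter (fun i => k == i.1) rules)) (fun x => x) false).length) := by
    intro k
    rw [PySem.Dict.contains_eq_decide_mem_keys, PySem.Dict.keys_foldl_modify_key,
        PySem.Dict.keys_empty, PySem.Set.update_nil_left]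
    simp only [decide_eq_decide, PySem.Set.mem_ofList, PySem.List.length_sorted,
      List.length_map, List.mem_map, List.length_pos_iff, ne_eq, List.filter_eq_nil_iff]
    constructor
    · rintro ⟨p, hp, rfl⟩ h
      exact absurd (h p hp) (by simp)
    · intro h
      by_contra hne
      push Not at hne
      exact h (fun i hi => by simp; rintro rfl; exact hne i hi rfl)
  calc populate_rule_dict keys rules
      = List.map (fun k => (k, PySem.List.sorted
            (List.map (fun i => i.2) (List.filter (fun i => k == i.1) rules)) (fun x => x) false))
          (List.filter (fun k => decide (0 < (PySem.List.sorted
            (List.map (fun i => i.2) (List.filter (fun i => k == i.1) rules)) (fun x => x) false).length))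
            (PySem.Set.ofList keys)) := by
        unfold populate_rule_dict
        simp only [pv_itemsA, List.map_map, Function.comp_def,
          PySem.List.foldl_append_if, List.nil_append, List.filter_map]
    _ = populate_rule_dict_alt keys rules := by
        unfold populate_rule_dict_alt
        symm
        show (List.foldl (fun o k =>
            if (List.foldl (fun g p => g.modify p.1 [] (fun x => x ++ [p.2])) PySem.Dict.empty rules).contains k = true then
              o.insert k (PySem.List.sorted ((List.foldl (fun g p => g.modify p.1 [] (fun x => x ++ [p.2])) PySem.Dict.empty rules).getD k []) (fun x => x) false)
            else o) PySem.Dict.empty (PySem.List.dedup keys)).items = _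
        rw [PySem.List.dedup_eq_ofList, pv_B_items _ _ (PySem.Set.nodup_ofList keys)]
        rw [List.filter_congr (fun k _ => hcont k)]
        refine List.map_congr_left (fun k _ => ?_)
        rw [hgroupsD]
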